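-- pv_equiv track=rewrite | github.com/S0jer/algorithms-and-data-structures-course-2022 | BitAlgo/Bajt_algo_kol2/1. Największa_roznica_w_podciagu.py | roznica
-- ===== SOURCE A (Python) =====
-- def roznica(A):
--     n = len(A)
--     dp = [[0 for _ in range(n + 1)] for _ in range(n + 1)]
--
--     for i in range(1, n + 1):
--         for j in range(i, n + 1):
--             if A[j - 1] == 0:
--                 dp[i][j] = dp[i][j - 1] + 1
--             elif A[j - 1] == 1:
--                 dp[i][j] = dp[i][j - 1] - 1
--
--     result, indexes = -10, (-1, -1)
--
--     for a in range(n + 1):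
--         for b in range(a, n + 1):
--             if dp[a][b] > result:
--                 result = dp[a][b]
--                 indexes = (a - 1, b - 1)
--
--     return result, indexes
-- ===== SOURCE B (Python) =====
-- def roznica(A):
--     # One fused streaming pass: a running 0/1 balance per start index replaces
--     # A's (n+1)x(n+1) dp table and its second full-table scan.
--     n = len(A)
--     result, indexes = 0, (-1, -1)
--     for a in range(1, n + 1):
--         bal = 0
--         for b in range(a, n + 1):
--             x = A[b - 1]
--             if x == 0:
--                 bal += 1
--             elif x == 1:
--                 bal -= 1
--             else:
--                 bal = 0
--             if bal > result:
--                 result, indexes = bal, (a - 1, b - 1)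
--     return result, indexes
-- ===== Notes on version B (the rewrite author's own statement) =====
-- stated objective: simpler
-- what changed: Replaces the (n+1)x(n+1) dp table (one double loop to fill it, a second double loop to scan it) by a single fused double loop keeping only a running 0/1 balance per start index and comparing on the fly, O(1) extra space instead of O(n^2).
import Mathlib
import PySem

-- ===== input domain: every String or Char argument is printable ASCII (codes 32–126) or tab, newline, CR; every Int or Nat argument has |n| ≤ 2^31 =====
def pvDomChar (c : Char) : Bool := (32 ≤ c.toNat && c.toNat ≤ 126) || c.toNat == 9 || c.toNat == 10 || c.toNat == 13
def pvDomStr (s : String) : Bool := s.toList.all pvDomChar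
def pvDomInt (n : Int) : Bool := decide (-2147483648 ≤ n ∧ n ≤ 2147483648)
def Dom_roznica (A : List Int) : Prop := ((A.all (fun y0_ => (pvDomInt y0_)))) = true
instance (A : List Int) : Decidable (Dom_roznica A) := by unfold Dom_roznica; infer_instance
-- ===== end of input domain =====

-- B replaces A's (n+1)×(n+1) dp table and its second full-table scan by one fused
-- double loop keeping only a running 0/1 balance per start index (O(1) extra space).

-- ===== PORT A =====
-- indices into dp / A are provably in range here, so the total pyGetD/pySetD forms are exact
def roznica (A : List Int) : Int × (Int × Int) :=
  let n : Int := PySem.List.len A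
  let dp : List (List Int) :=
    (PySem.List.pyRange 0 (n+1) 1).map (fun _ =>
      (PySem.List.pyRange 0 (n+1) 1).map (fun _ => (0 : Int)))
  let dp : List (List Int) :=
    (PySem.List.pyRange 1 (n+1) 1).foldl (fun dp i =>
      (PySem.List.pyRange i (n+1) 1).foldl (fun dp j =>
        if PySem.List.pyGetD A (j-1) 0 = 0 then
          PySem.List.pySetD dp i
            (PySem.List.pySetD (PySem.List.pyGetD dp i [])
              j (PySem.List.pyGetD (PySem.List.pyGetD dp i []) (j-1) 0 + 1))
        else if PySem.List.pyGetD A (j-1) 0 = 1 then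
          PySem.List.pySetD dp i
            (PySem.List.pySetD (PySem.List.pyGetD dp i [])
              j (PySem.List.pyGetD (PySem.List.pyGetD dp i []) (j-1) 0 - 1))
        else dp) dp) dp
  (PySem.List.pyRange 0 (n+1) 1).foldl (fun st a =>
    (PySem.List.pyRange a (n+1) 1).foldl (fun (st : Int × (Int × Int)) b =>
      if PySem.List.pyGetD (PySem.List.pyGetD dp a []) b 0 > st.1 then
        (PySem.List.pyGetD (PySem.List.pyGetD dp a []) b 0, (a-1, b-1))
      else st) st) (-10, (-1, -1))

-- ===== PORT B =====
def roznica_alt (A : List Int) : Int × (Int × Int) :=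
  let n : Int := PySem.List.len A
  ((PySem.List.pyRange 1 (n+1) 1).foldl (fun st a =>
    ((PySem.List.pyRange a (n+1) 1).foldl
      (fun (p : Int × (Int × (Int × Int))) b =>
        let x := PySem.List.pyGetD A (b-1) 0
        let bal := if x = 0 then p.1 + 1 else if x = 1 then p.1 - 1 else 0
        if bal > p.2.1 then (bal, (bal, (a-1, b-1))) else (bal, p.2))
      (0, st)).2)
    ((0 : Int), ((-1 : Int), (-1 : Int))))

-- ===== PRECONDITION & SPEC =====
def Spec_roznica (A : List Int) (out : Int × (Int × Int)) : Prop := out = roznica_alt A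
instance (A : List Int) (out : Int × (Int × Int)) : Decidable (Spec_roznica A out) := by unfold Spec_roznica; infer_instance

-- ===== CLAIM (what is proved, stated in full; the proofs are below) =====
def Claim_equal_roznica : Prop := ∀ (A : List Int), Dom_roznica A → Spec_roznica A (roznica A)

-- ===== LEMMAS AND PROOFS =====

def pvStep (b x : Int) : Int := if x = 0 then b + 1 else if x = 1 then b - 1 else 0

def pvW (A : List Int) (a j : Int) : Int :=
  ((A.drop (a-1).toNat).take (j+1-a).toNat).foldl pvStep 0

theorem pvW_base (A : List Int) (a j : Int) (h : j + 1 ≤ a) : pvW A a j = 0 := by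
  unfold pvW
  have : (j+1-a).toNat = 0 := by omega
  simp [this]

theorem pvW_rec (A : List Int) (a j : Int) (h1 : 1 ≤ a) (h2 : a ≤ j) (h3 : j ≤ A.length) :
    pvW A a j = pvStep (pvW A a (j-1)) (A.getD (j-1).toNat 0) := by
  unfold pvW
  have hk : (j+1-a).toNat = (j-a).toNat + 1 := by omega
  have hlt : (j-1).toNat < A.length := by omega
  have hidx : (a-1).toNat + (j-a).toNat = (j-1).toNat := by omega
  rw [hk, List.take_add_one]
  have hget : (A.drop (a-1).toNat)[(j-a).toNat]? = some A[(j-1).toNat] := by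
    rw [List.getElem?_drop, hidx, List.getElem?_eq_getElem hlt]
  rw [hget]
  have hgd : A.getD (j-1).toNat 0 = A[(j-1).toNat] := List.getD_eq_getElem A 0 hlt
  simp only [Option.toList_some, List.foldl_append, List.foldl_cons, List.foldl_nil]
  have he : j - 1 + 1 - a = j - a := by ring
  rw [he, hgd]

def pvRow (A : List Int) (a j0 : Int) : List Int :=
  (PySem.List.pyRange 0 (A.length + 1) 1).map (fun j => if a ≤ j ∧ j < j0 then pvW A a j else 0)

def pvTab (A : List Int) (i0 : Int) : List (List Int) :=
  (PySem.List.pyRange 0 (A.length + 1) 1).map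
    (fun i => if 1 ≤ i ∧ i < i0 then pvRow A i (A.length + 1) else pvRow A i 0)

theorem pvRow_length (A : List Int) (a j0 : Int) : (pvRow A a j0).length = A.length + 1 := by
  simp [pvRow, PySem.List.length_pyRange_one]

theorem pvTab_length (A : List Int) (i0 : Int) : (pvTab A i0).length = A.length + 1 := by
  simp [pvTab, PySem.List.length_pyRange_one]

theorem pvRow_get (A : List Int) (a j0 t : Int) (h0 : 0 ≤ t) (h1 : t ≤ A.length) :
    PySem.List.pyGetD (pvRow A a j0) t 0 =
      if a ≤ t ∧ t < j0 then pvW A a t else 0 := by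
  unfold pvRow
  rw [PySem.List.pyGetD_map_pyRange_of_nonneg _ _ _ _ h0 (by omega)]

theorem pvTab_get (A : List Int) (i0 i : Int) (h0 : 0 ≤ i) (h1 : i ≤ A.length) :
    PySem.List.pyGetD (pvTab A i0) i [] =
      if 1 ≤ i ∧ i < i0 then pvRow A i (A.length + 1) else pvRow A i 0 := by
  unfold pvTab
  rw [PySem.List.pyGetD_map_pyRange_of_nonneg _ _ _ _ h0 (by omega)]

theorem pvRow_eq_of (A : List Int) (a : Int) {j0 j1 : Int}
    (h : ∀ j : Int, 0 ≤ j → j ≤ A.length →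
      (if a ≤ j ∧ j < j0 then pvW A a j else 0) = (if a ≤ j ∧ j < j1 then pvW A a j else 0)) :
    pvRow A a j0 = pvRow A a j1 := by
  unfold pvRow
  apply List.map_congr_left
  intro x hx
  rw [PySem.List.mem_pyRange_one] at hx
  exact h x hx.1 (by omega)

theorem pvRow_final (A : List Int) (a j0 : Int) (h : A.length + 1 ≤ j0) :
    pvRow A a j0 = pvRow A a (A.length + 1) := by
  apply pvRow_eq_of
  intro j h0 h1
  split_ifs <;> first | rfl | omega

theorem pvRow_zero_eq (A : List Int) (a : Int) (h : 0 ≤ a) :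
    pvRow A a 0 = pvRow A a a := by
  apply pvRow_eq_of
  intro j h0 h1
  have h2 : ¬ (a ≤ j ∧ j < 0) := by omega
  have h3 : ¬ (a ≤ j ∧ j < a) := by omega
  rw [if_neg h2, if_neg h3]

theorem pvGetSet {α : Type} (xs : List α) (i : Int) (v d : α) (h0 : 0 ≤ i) (h1 : i < xs.length) :
    PySem.List.pyGetD (PySem.List.pySetD xs i v) i d = v := by
  rw [PySem.List.pySetD_of_nonneg _ _ h0,
      PySem.List.pyGetD_eq_getElem _ d h0 (by simp; omega)]
  simp

theorem pvRow_set (A : List Int) (a j0 : Int) (ha : a ≤ j0) (h0 : 0 ≤ j0) (hn : j0 ≤ A.length) :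
    PySem.List.pySetD (pvRow A a j0) j0 (pvW A a j0) = pvRow A a (j0 + 1) := by
  rw [PySem.List.pySetD_of_nonneg _ _ h0]
  apply List.ext_getElem
  · simp [pvRow_length]
  intro k hk1 hk2
  rw [List.getElem_set]
  unfold pvRow
  have hkr : k < (PySem.List.pyRange 0 ((A.length:Int) + 1) 1).length := by
    rw [PySem.List.length_pyRange_one]; rw [List.length_set, pvRow_length] at hk1; omega
  rw [List.getElem_map, List.getElem_map, PySem.List.getElem_pyRange_one]
  simp only [zero_add]
  split_ifs <;> first | rfl | omega | (congr 1; omega) | (exfalso; omega)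

theorem pvRow_stable (A : List Int) (a j0 : Int) (ha : a ≤ j0) (hw : pvW A a j0 = 0) :
    pvRow A a (j0 + 1) = pvRow A a j0 := by
  apply pvRow_eq_of
  intro j h0 h1
  split_ifs with hc1 hc2 hc2 <;> first | rfl | omega | skip
  · -- j < j0+1 but ¬ j < j0 → j = j0
    have : j = j0 := by omega
    rw [this, hw]

theorem pvTab_set (A : List Int) (i0 : Int) (h1 : 1 ≤ i0) (h2 : i0 ≤ A.length) :
    PySem.List.pySetD (pvTab A i0) i0 (pvRow A i0 (A.length + 1)) = pvTab A (i0 + 1) := by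
  rw [PySem.List.pySetD_of_nonneg _ _ (by omega)]
  apply List.ext_getElem
  · simp [pvTab_length]
  intro k hk1 hk2
  rw [List.getElem_set]
  unfold pvTab
  have hkr : k < (PySem.List.pyRange 0 ((A.length:Int) + 1) 1).length := by
    rw [PySem.List.length_pyRange_one]; rw [List.length_set, pvTab_length] at hk1; omega
  rw [List.getElem_map, List.getElem_map, PySem.List.getElem_pyRange_one]
  simp only [zero_add]
  split_ifs <;> first | rfl | omega | (congr 1; omega)

theorem pvTabM_init (A : List Int) (i : Int) (h1 : 1 ≤ i) (h2 : i ≤ A.length) :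
    PySem.List.pySetD (pvTab A i) i (pvRow A i i) = pvTab A i := by
  rw [← pvRow_zero_eq A i (by omega), PySem.List.pySetD_of_nonneg _ _ (by omega)]
  have hkr : i.toNat < (PySem.List.pyRange 0 ((A.length:Int) + 1) 1).length := by
    rw [PySem.List.length_pyRange_one]; omega
  have hget : (pvTab A i)[i.toNat]'(by rw [pvTab_length]; omega) = pvRow A i 0 := by
    unfold pvTab
    rw [List.getElem_map, PySem.List.getElem_pyRange_one]
    simp only [zero_add]
    rw [if_neg (by omega)]
    congr 1; omega
  rw [← hget]
  simp

theorem pvSetSet {α : Type} (xs : List α) (i : Int) (u v : α) (h0 : 0 ≤ i) :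
    PySem.List.pySetD (PySem.List.pySetD xs i u) i v = PySem.List.pySetD xs i v := by
  rw [PySem.List.pySetD_of_nonneg _ _ h0, PySem.List.pySetD_of_nonneg _ _ h0,
      PySem.List.pySetD_of_nonneg _ _ h0, List.set_set]

theorem pvInner (A : List Int) (i : Int) (hi1 : 1 ≤ i) (hi2 : i ≤ (A.length:Int)) :
    ∀ (m : Nat) (j0 : Int), i ≤ j0 → (A.length:Int) + 1 ≤ j0 + m →
    (PySem.List.pyRange j0 ((A.length:Int)+1) 1).foldl
      (fun dp j =>
        if PySem.List.pyGetD A (j-1) 0 = 0 then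
          PySem.List.pySetD dp i (PySem.List.pySetD (PySem.List.pyGetD dp i []) j
            (PySem.List.pyGetD (PySem.List.pyGetD dp i []) (j-1) 0 + 1))
        else if PySem.List.pyGetD A (j-1) 0 = 1 then
          PySem.List.pySetD dp i (PySem.List.pySetD (PySem.List.pyGetD dp i []) j
            (PySem.List.pyGetD (PySem.List.pyGetD dp i []) (j-1) 0 - 1))
        else dp)
      (PySem.List.pySetD (pvTab A i) i (pvRow A i j0))
    = PySem.List.pySetD (pvTab A i) i (pvRow A i ((A.length:Int)+1)) := by
  intro m
  induction m with
  | zero =>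
    intro j0 h1 h2
    rw [PySem.List.pyRange_one_eq_nil (by omega), List.foldl_nil,
        pvRow_final A i j0 (by omega)]
  | succ m ih =>
    intro j0 h1 h2
    by_cases hend : (A.length:Int) + 1 ≤ j0
    · rw [PySem.List.pyRange_one_eq_nil (by omega), List.foldl_nil, pvRow_final A i j0 hend]
    rw [not_le] at hend
    rw [PySem.List.pyRange_one_cons (by omega), List.foldl_cons]
    have hrow : PySem.List.pyGetD (PySem.List.pySetD (pvTab A i) i (pvRow A i j0)) i []
        = pvRow A i j0 :=
      pvGetSet _ _ _ _ (by omega) (by rw [pvTab_length]; push_cast; omega)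
    have hprev : PySem.List.pyGetD (pvRow A i j0) (j0-1) 0 = pvW A i (j0-1) := by
      rw [pvRow_get A i j0 (j0-1) (by omega) (by omega)]
      split_ifs with hc
      · rfl
      · have hji : j0 = i := by omega
        rw [hji, (pvW_base A i (i-1) (by omega))]
    have hA : PySem.List.pyGetD A (j0-1) 0 = A.getD (j0-1).toNat 0 := by
      rw [PySem.List.pyGetD_eq_getElem _ 0 (by omega) (by push_cast; omega),
          List.getD_eq_getElem A 0 (by omega)]
    have hrec := pvW_rec A i j0 hi1 h1 (by omega)
    have hstep :
        (if PySem.List.pyGetD A (j0-1) 0 = 0 then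
          PySem.List.pySetD (PySem.List.pySetD (pvTab A i) i (pvRow A i j0)) i
            (PySem.List.pySetD
              (PySem.List.pyGetD (PySem.List.pySetD (pvTab A i) i (pvRow A i j0)) i []) j0
              (PySem.List.pyGetD
                (PySem.List.pyGetD (PySem.List.pySetD (pvTab A i) i (pvRow A i j0)) i []) (j0-1) 0 + 1))
        else if PySem.List.pyGetD A (j0-1) 0 = 1 then
          PySem.List.pySetD (PySem.List.pySetD (pvTab A i) i (pvRow A i j0)) i
            (PySem.List.pySetD
              (PySem.List.pyGetD (PySem.List.pySetD (pvTab A i) i (pvRow A i j0)) i []) j0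
              (PySem.List.pyGetD
                (PySem.List.pyGetD (PySem.List.pySetD (pvTab A i) i (pvRow A i j0)) i []) (j0-1) 0 - 1))
        else PySem.List.pySetD (pvTab A i) i (pvRow A i j0))
        = PySem.List.pySetD (pvTab A i) i (pvRow A i (j0+1)) := by
      rw [hrow, hprev, hA]
      split_ifs with hx0 hx1
      · rw [pvSetSet _ _ _ _ (by omega)]
        congr 1
        have : pvW A i (j0-1) + 1 = pvW A i j0 := by
          rw [hrec]; unfold pvStep; rw [if_pos hx0]
        rw [this]
        exact pvRow_set A i j0 h1 (by omega) (by omega)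
      · rw [pvSetSet _ _ _ _ (by omega)]
        congr 1
        have : pvW A i (j0-1) - 1 = pvW A i j0 := by
          rw [hrec]; unfold pvStep; rw [if_neg hx0, if_pos hx1]
        rw [this]
        exact pvRow_set A i j0 h1 (by omega) (by omega)
      · congr 1
        have hw : pvW A i j0 = 0 := by
          rw [hrec]; unfold pvStep; rw [if_neg hx0, if_neg hx1]
        exact (pvRow_stable A i j0 h1 hw).symm
    rw [hstep]
    exact ih (j0+1) (by omega) (by omega)

theorem pvTab_final (A : List Int) (i0 : Int) (h : (A.length:Int) + 1 ≤ i0) :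
    pvTab A i0 = pvTab A ((A.length:Int) + 1) := by
  unfold pvTab
  apply List.map_congr_left
  intro x hx
  rw [PySem.List.mem_pyRange_one] at hx
  split_ifs <;> first | rfl | omega

theorem pvOuter (A : List Int) :
    ∀ (m : Nat) (i0 : Int), 1 ≤ i0 → (A.length:Int) + 1 ≤ i0 + m →
    (PySem.List.pyRange i0 ((A.length:Int)+1) 1).foldl
      (fun dp i =>
        (PySem.List.pyRange i ((A.length:Int)+1) 1).foldl
          (fun dp j =>
            if PySem.List.pyGetD A (j-1) 0 = 0 then
              PySem.List.pySetD dp i (PySem.List.pySetD (PySem.List.pyGetD dp i []) j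
                (PySem.List.pyGetD (PySem.List.pyGetD dp i []) (j-1) 0 + 1))
            else if PySem.List.pyGetD A (j-1) 0 = 1 then
              PySem.List.pySetD dp i (PySem.List.pySetD (PySem.List.pyGetD dp i []) j
                (PySem.List.pyGetD (PySem.List.pyGetD dp i []) (j-1) 0 - 1))
            else dp) dp)
      (pvTab A i0)
    = pvTab A ((A.length:Int)+1) := by
  intro m
  induction m with
  | zero =>
    intro i0 h1 h2
    rw [PySem.List.pyRange_one_eq_nil (by omega), List.foldl_nil]
    exact pvTab_final A i0 (by omega)
  | succ m ih =>
    intro i0 h1 h2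
    by_cases hend : (A.length:Int) + 1 ≤ i0
    · rw [PySem.List.pyRange_one_eq_nil (by omega), List.foldl_nil]
      exact pvTab_final A i0 (by omega)
    rw [not_le] at hend
    rw [PySem.List.pyRange_one_cons (by omega), List.foldl_cons]
    have hinit : pvTab A i0 = PySem.List.pySetD (pvTab A i0) i0 (pvRow A i0 i0) :=
      (pvTabM_init A i0 h1 (by omega)).symm
    rw [hinit, pvInner A i0 h1 (by omega) (A.length + 1) i0 (le_refl _) (by push_cast; omega),
        pvTab_set A i0 h1 (by omega)]
    exact ih (i0+1) (by omega) (by omega)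

theorem pvTab_init (A : List Int) :
    ((PySem.List.pyRange 0 ((A.length:Int)+1) 1).map (fun _ =>
      (PySem.List.pyRange 0 ((A.length:Int)+1) 1).map (fun _ => (0:Int)))) = pvTab A 1 := by
  unfold pvTab
  apply List.map_congr_left
  intro x hx
  rw [PySem.List.mem_pyRange_one] at hx
  rw [if_neg (by omega)]
  unfold pvRow
  apply List.map_congr_left
  intro j hj
  rw [PySem.List.mem_pyRange_one] at hj
  rw [if_neg (by omega)]

theorem pvTabF_read (A : List Int) (a b : Int) (ha0 : 0 ≤ a) (ha1 : a ≤ (A.length:Int))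
    (hb0 : 0 ≤ b) (hb1 : b ≤ (A.length:Int)) :
    PySem.List.pyGetD (PySem.List.pyGetD (pvTab A ((A.length:Int)+1)) a []) b 0
      = if 1 ≤ a ∧ a ≤ b then pvW A a b else 0 := by
  rw [pvTab_get A _ a ha0 (by omega)]
  split_ifs with h1 h2 h2
  · rw [pvRow_get A a _ b hb0 (by omega), if_pos ⟨h2.2, by omega⟩]
  · rw [pvRow_get A a _ b hb0 (by omega), if_neg (by omega)]
  · omega
  · rw [pvRow_get A a 0 b hb0 (by omega), if_neg (by omega)]

theorem pvZeroFold (l : List Int) (e : Int → Int × (Int × Int)) :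
    ∀ (st : Int × (Int × Int)), 0 ≤ st.1 →
      l.foldl (fun st b => if (0:Int) > st.1 then e b else st) st = st := by
  induction l with
  | nil => intro st _; rfl
  | cons x xs ih =>
    intro st h
    rw [List.foldl_cons, if_neg (by omega)]
    exact ih st h

theorem pvRowEq (A : List Int) (a : Int) (ha1 : 1 ≤ a) (ha2 : a ≤ (A.length:Int)) :
    ∀ (m : Nat) (j0 : Int), a ≤ j0 → (A.length:Int) + 1 ≤ j0 + m →
    ∀ st : Int × (Int × Int),
    (PySem.List.pyRange j0 ((A.length:Int)+1) 1).foldl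
      (fun st b => if pvW A a b > st.1 then (pvW A a b, (a-1, b-1)) else st) st
    = ((PySem.List.pyRange j0 ((A.length:Int)+1) 1).foldl
        (fun (p : Int × (Int × (Int × Int))) b =>
          let x := PySem.List.pyGetD A (b-1) 0
          let bal := if x = 0 then p.1 + 1 else if x = 1 then p.1 - 1 else 0
          if bal > p.2.1 then (bal, (bal, (a-1, b-1))) else (bal, p.2))
        (pvW A a (j0-1), st)).2 := by
  intro m
  induction m with
  | zero =>
    intro j0 h1 h2 st
    rw [PySem.List.pyRange_one_eq_nil (by omega)]
    rfl
  | succ m ih =>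
    intro j0 h1 h2 st
    by_cases hend : (A.length:Int) + 1 ≤ j0
    · rw [PySem.List.pyRange_one_eq_nil (by omega)]; rfl
    rw [not_le] at hend
    rw [PySem.List.pyRange_one_cons (by omega)]
    simp only [List.foldl_cons]
    have hA : PySem.List.pyGetD A (j0-1) 0 = A.getD (j0-1).toNat 0 := by
      rw [PySem.List.pyGetD_eq_getElem _ 0 (by omega) (by push_cast; omega),
          List.getD_eq_getElem A 0 (by omega)]
    have hrec := (pvW_rec A a j0 ha1 h1 (by omega)).symm
    unfold pvStep at hrec
    rw [hA, hrec]
    by_cases hc : pvW A a j0 > st.1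
    · rw [if_pos hc, if_pos hc]
      have := ih (j0+1) (by omega) (by omega) (pvW A a j0, (a-1, j0-1))
      simpa using this
    · rw [if_neg hc, if_neg hc]
      have := ih (j0+1) (by omega) (by omega) st
      simpa using this

theorem pvRow0 (A : List Int) :
    (PySem.List.pyRange 0 ((A.length:Int)+1) 1).foldl
      (fun (st : Int × (Int × Int)) b =>
        if PySem.List.pyGetD (PySem.List.pyGetD (pvTab A ((A.length:Int)+1)) 0 []) b 0 > st.1 then
          (PySem.List.pyGetD (PySem.List.pyGetD (pvTab A ((A.length:Int)+1)) 0 []) b 0, (0-1, b-1))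
        else st) (-10, (-1, -1))
    = (0, (-1, -1)) := by
  have h : ∀ (acc : Int × (Int × Int)), ∀ b ∈ PySem.List.pyRange 0 ((A.length:Int)+1) 1,
      (if PySem.List.pyGetD (PySem.List.pyGetD (pvTab A ((A.length:Int)+1)) 0 []) b 0 > acc.1 then
        (PySem.List.pyGetD (PySem.List.pyGetD (pvTab A ((A.length:Int)+1)) 0 []) b 0, ((0:Int)-1, b-1))
      else acc)
      = (if (0:Int) > acc.1 then ((0:Int), ((0:Int)-1, b-1)) else acc) := by
    intro acc b hb
    rw [PySem.List.mem_pyRange_one] at hb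
    rw [pvTabF_read A 0 b (by omega) (by omega) (by omega) (by omega),
        if_neg (show ¬((1:Int) ≤ 0 ∧ (0:Int) ≤ b) by omega)]
  rw [PySem.List.foldl_congr_mem _ _ _ _ h]
  rw [PySem.List.pyRange_one_cons (by omega)]
  simp only [List.foldl_cons]
  rw [if_pos (by norm_num)]
  rw [pvZeroFold _ _ _ (by norm_num)]
  norm_num

theorem pv_main (A : List Int) : roznica A = roznica_alt A := by
  unfold roznica roznica_alt
  simp only [PySem.List.len_eq]
  rw [pvTab_init A, pvOuter A (A.length + 1) 1 (by omega) (by push_cast; omega)]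
  rw [PySem.List.pyRange_one_cons (show (0:Int) < (A.length:Int) + 1 by omega)]
  simp only [List.foldl_cons]
  rw [pvRow0 A]
  apply PySem.List.foldl_congr_mem
  intro st a ha
  rw [PySem.List.mem_pyRange_one] at ha
  have h : ∀ (acc : Int × (Int × Int)), ∀ b ∈ PySem.List.pyRange a ((A.length:Int)+1) 1,
      (if PySem.List.pyGetD (PySem.List.pyGetD (pvTab A ((A.length:Int)+1)) a []) b 0 > acc.1 then
        (PySem.List.pyGetD (PySem.List.pyGetD (pvTab A ((A.length:Int)+1)) a []) b 0, (a-1, b-1))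
      else acc)
      = (if pvW A a b > acc.1 then (pvW A a b, (a-1, b-1)) else acc) := by
    intro acc b hb
    rw [PySem.List.mem_pyRange_one] at hb
    rw [pvTabF_read A a b (by omega) (by omega) (by omega) (by omega),
        if_pos (show (1:Int) ≤ a ∧ a ≤ b by omega)]
  rw [PySem.List.foldl_congr_mem _ _ _ _ h]
  have h0 : pvW A a (a-1) = 0 := pvW_base A a (a-1) (by omega)
  rw [pvRowEq A a (by omega) (by omega) (A.length + 1) a (le_refl _) (by push_cast; omega) st, h0]

-- ===== VERDICT (by name: the statement is the Claim_ definition above) =====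
theorem roznica_spec : Claim_equal_roznica := by
  intro A _
  unfold Spec_roznica
  exact pv_main A
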